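-- pv_equiv track=rewrite | github.com/KINOX0924/Programmers_codingtest | 프로그래머스/0/181829. 이차원 배열 대각선 순회하기/이차원 배열 대각선 순회하기.py | solution
-- ===== SOURCE A (Python) =====
-- def solution(board, k):
--     total = 0
--     i = 0
--     j = 0
--
--     while i < len(board) :
--         if i + j <= k :
--             total += board[i][j]
--
--         j += 1
--         if j == len(board[0]) :
--             j = 0
--             i += 1
--
--     return total
-- ===== SOURCE B (Python) =====
-- def solution(board, k):
--     rows = len(board)
--     ncols = len(board[0]) if rows else 0
--     total = 0
--     for d in range(min(k, rows + ncols - 2) + 1):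
--         for i in range(max(0, d - ncols + 1), min(rows, d + 1)):
--             total += board[i][d - i]
--     return total
-- ===== Notes on version B (the rewrite author's own statement) =====
-- stated objective: faster
-- what changed: Replaces A's row-major scan of every cell with a per-cell i+j<=k test by an anti-diagonal traversal that enumerates only the diagonals d=i+j from 0 to min(k, rows+cols-2) and visits exactly the qualifying cells of each diagonal, so cells beyond the k-th anti-diagonal are never touched and no cell is tested and rejected.
import Mathlib
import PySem

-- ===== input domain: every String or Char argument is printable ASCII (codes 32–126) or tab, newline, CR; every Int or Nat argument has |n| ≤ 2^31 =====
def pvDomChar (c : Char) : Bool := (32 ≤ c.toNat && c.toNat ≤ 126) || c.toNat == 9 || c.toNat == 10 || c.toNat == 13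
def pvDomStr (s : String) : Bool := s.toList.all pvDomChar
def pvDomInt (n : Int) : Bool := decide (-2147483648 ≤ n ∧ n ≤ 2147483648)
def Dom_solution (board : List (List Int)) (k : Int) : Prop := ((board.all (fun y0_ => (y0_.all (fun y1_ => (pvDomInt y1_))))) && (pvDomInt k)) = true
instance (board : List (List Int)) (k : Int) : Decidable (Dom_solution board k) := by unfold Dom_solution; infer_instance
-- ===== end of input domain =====

-- B replaces A's row-major scan of every cell (flat while loop with a per-cell i+j<=k test)
-- by an anti-diagonal traversal: it enumerates only the diagonals d = i+j from 0 to
-- min(k, rows+cols-2) and, on each, exactly the cells of that diagonal; equal return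
-- values are proved on all inputs where A returns.

-- ===== PORT A =====
-- A's while loop: state (i, j, total); each iteration handles one (i, j) cell, j wraps at
-- len(board[0]).  Fuel = board.length * len(board[0]) is exactly the number of iterations
-- the Python loop performs on every input admitted by Pre_solution (where it terminates).
def loopA (board : List (List Int)) (k : Int) (m : Nat) : Nat → Nat → Nat → Int → Int
  | 0, _, _, total => total
  | fuel + 1, i, j, total =>
    if i < board.length then
      -- board[i][j]; indices are nonnegative and in range under Pre_solution, exact there
      let total' := if (i : Int) + (j : Int) ≤ k then
          total + PySem.List.pyGetD (PySem.List.pyGetD board (i : Int) []) (j : Int) 0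
        else total
      if j + 1 = m then loopA board k m fuel (i + 1) 0 total'
      else loopA board k m fuel i (j + 1) total'
    else total

def solution (board : List (List Int)) (k : Int) : Int :=
  loopA board k (board.headD []).length (board.length * (board.headD []).length) 0 0 0

-- ===== PORT B =====
def solution_alt (board : List (List Int)) (k : Int) : Int :=
  let rows : Int := PySem.List.len board
  -- 'len(board[0]) if rows else 0'
  let ncols : Int := if rows ≠ 0 then PySem.List.len (PySem.List.pyGetD board 0 []) else 0
  (PySem.List.pyRange 0 (min k (rows + ncols - 2) + 1) 1).foldl
    (fun total d =>
      (PySem.List.pyRange (max 0 (d - ncols + 1)) (min rows (d + 1)) 1).foldl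
        (fun t i => t + PySem.List.pyGetD (PySem.List.pyGetD board i []) (d - i) 0) total) 0

-- ===== PRECONDITION & SPEC =====
-- Pre_solution is EXACTLY where the Python A returns: an empty board, or a board whose first
-- row is nonempty (len(board[0]) == 0 makes A raise IndexError for k ≥ 0 and loop forever for
-- k < 0) and in which every cell board[i][j] that A reads (j < len(board[0]) and i+j ≤ k)
-- exists (otherwise A raises IndexError on a short row).
def Pre_solution (board : List (List Int)) (k : Int) : Prop :=
  board = [] ∨
  (0 < (board.headD []).length ∧
    ∀ i < board.length, ∀ j < (board.headD []).length,
      (i : Int) + (j : Int) ≤ k → j < (board.getD i []).length)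
instance (board : List (List Int)) (k : Int) : Decidable (Pre_solution board k) := by
  unfold Pre_solution; infer_instance

def pvWitness_solution : List (List Int) × Int := ([[1, 2, 3], [4, 5, 6]], 2)

def Spec_solution (board : List (List Int)) (k : Int) (out : Int) : Prop := out = solution_alt board k
instance (board : List (List Int)) (k : Int) (out : Int) : Decidable (Spec_solution board k out) := by unfold Spec_solution; infer_instance

-- ===== CLAIM (what is proved, stated in full; the proofs are below) =====
def Claim_equal_solution : Prop := ∀ (board : List (List Int)) (k : Int), Dom_solution board k → Pre_solution board k → Spec_solution board k (solution board k)

-- ===== LEMMAS AND PROOFS =====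

-- the value A adds at cell (i, j) (0 when the diagonal test fails; total under Pre_)
def gcell (board : List (List Int)) (k : Int) (i j : Nat) : Int :=
  if (i : Int) + (j : Int) ≤ k then (board.getD i []).getD j 0 else 0

-- what the rest of row i (columns j, j+1, …, m-1) contributes
def rowSum (board : List (List Int)) (k : Int) (m i j : Nat) : Int :=
  ((List.range (m - j)).map (fun t => gcell board k i (j + t))).sum

-- what rows a, a+1, …, n-1 contribute in full
def colSum (board : List (List Int)) (k : Int) (m a : Nat) : Int :=
  ((List.range (board.length - a)).map (fun t => rowSum board k m (a + t) 0)).sum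

lemma gcell_of_ge (board : List (List Int)) (k : Int) {i : Nat} (j : Nat)
    (h : board.length ≤ i) : gcell board k i j = 0 := by
  simp [gcell, List.getD, List.getElem?_eq_none h]

lemma rowSum_of_ge (board : List (List Int)) (k : Int) (m : Nat) {i : Nat} (j : Nat)
    (h : board.length ≤ i) : rowSum board k m i j = 0 := by
  simp [rowSum, gcell_of_ge board k _ h]

lemma rowSum_succ (board : List (List Int)) (k : Int) {m : Nat} (i : Nat) {j : Nat}
    (hj : j < m) : rowSum board k m i j = gcell board k i j + rowSum board k m i (j + 1) := by
  have e : m - j = (m - (j + 1)) + 1 := by omega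
  rw [rowSum, e, List.range_succ_eq_map]
  simp only [List.map_cons, List.map_map, List.sum_cons, Nat.add_zero]
  rw [rowSum]
  congr 2
  apply List.map_congr_left
  intro t _
  simp only [Function.comp]
  congr 1
  omega

lemma colSum_succ (board : List (List Int)) (k : Int) (m a : Nat) :
    colSum board k m a = rowSum board k m a 0 + colSum board k m (a + 1) := by
  by_cases ha : a < board.length
  · have e : board.length - a = (board.length - (a + 1)) + 1 := by omega
    rw [colSum, e, List.range_succ_eq_map]
    simp only [List.map_cons, List.map_map, List.sum_cons, Nat.add_zero]
    rw [colSum]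
    congr 2
    apply List.map_congr_left
    intro t _
    simp only [Function.comp]
    congr 1
    omega
  · have e1 : board.length - a = 0 := by omega
    have e2 : board.length - (a + 1) = 0 := by omega
    rw [colSum, colSum, e1, e2, rowSum_of_ge board k m 0 (by omega)]
    simp

-- the loop invariant: with enough fuel, the while loop adds the remaining cells' sum
lemma loopA_inv (board : List (List Int)) (k : Int) {m : Nat} (hm : 0 < m) :
    ∀ fuel i j total, j < m → (board.length - i) * m - j ≤ fuel →
      loopA board k m fuel i j total = total + rowSum board k m i j + colSum board k m (i + 1) := by
  intro fuel
  induction fuel with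
  | zero =>
    intro i j total hj hfuel
    have hi : board.length ≤ i := by
      by_contra hlt
      have h1 : m ≤ (board.length - i) * m := Nat.le_mul_of_pos_left m (by omega)
      omega
    have e2 : board.length - (i + 1) = 0 := by omega
    rw [loopA, rowSum_of_ge board k m j hi, colSum, e2]
    simp
  | succ fuel ih =>
    intro i j total hj hfuel
    by_cases hi : i < board.length
    · rw [loopA]
      simp only [if_pos hi]
      have htot : (if (i : Int) + (j : Int) ≤ k then
            total + PySem.List.pyGetD (PySem.List.pyGetD board (i : Int) []) (j : Int) 0
          else total) = total + gcell board k i j := by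
        by_cases hk : (i : Int) + (j : Int) ≤ k
        · simp [gcell, hk, PySem.List.pyGetD_natCast]
        · simp [gcell, hk]
      rw [htot]
      by_cases hw : j + 1 = m
      · simp only [if_pos hw]
        have e : board.length - i = (board.length - (i + 1)) + 1 := by omega
        have emul : (board.length - i) * m = (board.length - (i + 1)) * m + m := by
          rw [e, Nat.succ_mul]
        rw [ih (i + 1) 0 (total + gcell board k i j) hm (by omega)]
        have h1 : rowSum board k m i j = gcell board k i j + rowSum board k m i (j + 1) :=
          rowSum_succ board k i hj
        have h2 : rowSum board k m i (j + 1) = 0 := by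
          rw [rowSum, hw]; simp
        have h3 : colSum board k m (i + 1) =
            rowSum board k m (i + 1) 0 + colSum board k m (i + 2) :=
          colSum_succ board k m (i + 1)
        rw [h1, h2, h3]; ring
      · simp only [if_neg hw]
        rw [ih i (j + 1) (total + gcell board k i j) (by omega) (by omega)]
        rw [rowSum_succ board k i hj]; ring
    · rw [loopA]
      simp only [if_neg hi]
      rw [rowSum_of_ge board k m j (by omega), colSum,
        show board.length - (i + 1) = 0 by omega]
      simp

-- A's result is the full cell sum (rows 0 … n-1) whenever the first row is nonempty
lemma solution_eq_colSum (board : List (List Int)) (k : Int)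
    (hm : 0 < (board.headD []).length) :
    solution board k = colSum board k (board.headD []).length 0 := by
  rw [solution, loopA_inv board k hm _ 0 0 0 hm (by simp),
    colSum_succ board k (board.headD []).length 0]
  ring

-- bridge: a list sum over List.range IS the Finset sum over Finset.range
lemma listSum_range (n : Nat) (f : Nat → Int) :
    ((List.range n).map f).sum = ∑ t ∈ Finset.range n, f t := rfl

-- A's row-major guarded double sum as a Finset double sum
lemma colSum_eq_finset (board : List (List Int)) (k : Int) (m : Nat) :
    colSum board k m 0 =
      ∑ i ∈ Finset.range board.length, ∑ j ∈ Finset.range m,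
        (if (i : Int) + (j : Int) ≤ k then (board.getD i []).getD j 0 else 0) := by
  rw [colSum, Nat.sub_zero, listSum_range]
  apply Finset.sum_congr rfl
  intro i _
  rw [rowSum, Nat.sub_zero, listSum_range]
  apply Finset.sum_congr rfl
  intro j _
  simp [gcell]

-- the diagonal reindexing: summing diagonal by diagonal equals the row-major guarded sum
lemma diag_reindex (n m : Nat) (k : Int) (v : Nat → Nat → Int) :
    ∑ d ∈ Finset.range (min k ((n : Int) + (m : Int) - 2) + 1).toNat,
      ∑ i ∈ Finset.Ico (d + 1 - m) (min n (d + 1)), v i (d - i) =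
    ∑ i ∈ Finset.range n, ∑ j ∈ Finset.range m,
      (if (i : Int) + (j : Int) ≤ k then v i j else 0) := by
  have hR : ∀ i : Nat, (∑ j ∈ Finset.range m, (if (i : Int) + (j : Int) ≤ k then v i j else 0)) =
      ∑ j ∈ (Finset.range m).filter (fun j : Nat => (i : Int) + (j : Int) ≤ k), v i j := by
    intro i
    rw [Finset.sum_filter]
  simp only [hR]
  rw [Finset.sum_sigma' (Finset.range (min k ((n : Int) + (m : Int) - 2) + 1).toNat)
      (fun d => Finset.Ico (d + 1 - m) (min n (d + 1))) (fun d i => v i (d - i)),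
    Finset.sum_sigma' (Finset.range n)
      (fun i => (Finset.range m).filter (fun j : Nat => (i : Int) + (j : Int) ≤ k))
      (fun i j => v i j)]
  refine Finset.sum_nbij' (fun x => ⟨x.2, x.1 - x.2⟩) (fun y => ⟨y.1 + y.2, y.1⟩) ?_ ?_ ?_ ?_ ?_
  · rintro ⟨d, i⟩ hx
    simp only [Finset.mem_sigma, Finset.mem_range, Finset.mem_Ico, Finset.mem_filter] at hx ⊢
    omega
  · rintro ⟨i, j⟩ hy
    simp only [Finset.mem_sigma, Finset.mem_range, Finset.mem_Ico, Finset.mem_filter] at hy ⊢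
    omega
  · rintro ⟨d, i⟩ hx
    simp only [Finset.mem_sigma, Finset.mem_range, Finset.mem_Ico] at hx
    have : i + (d - i) = d := by omega
    simp [this]
  · rintro ⟨i, j⟩ _hy
    have : i + j - i = j := by omega
    simp [this]
  · rintro ⟨d, i⟩ _
    rfl

-- B's outer loop body: what one diagonal d contributes, as a Finset sum over row indices
lemma diagTerm_eq (board : List (List Int)) (d : Nat) :
    (PySem.List.pyRange (max 0 ((d : Int) - ((board.headD []).length : Int) + 1))
        (min (board.length : Int) ((d : Int) + 1)) 1).foldl
      (fun t i => t + PySem.List.pyGetD (PySem.List.pyGetD board i []) ((d : Int) - i) 0) 0 =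
    ∑ i ∈ Finset.Ico (d + 1 - (board.headD []).length) (min board.length (d + 1)),
      (board.getD i []).getD (d - i) 0 := by
  set m := (board.headD []).length with hmdef
  set lo : Nat := d + 1 - m with hlodef
  set hi : Nat := min board.length (d + 1) with hhidef
  have hlo : max 0 ((d : Int) - (m : Int) + 1) = (lo : Int) := by omega
  have hhi : min (board.length : Int) ((d : Int) + 1) = (hi : Int) := by omega
  rw [PySem.List.foldl_add, hlo, hhi, PySem.List.pyRange_one, List.map_map, listSum_range,
    Finset.sum_Ico_eq_sum_range, zero_add]
  have hcnt : ((hi : Int) - (lo : Int)).toNat = hi - lo := by omega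
  rw [hcnt]
  apply Finset.sum_congr rfl
  intro t ht
  have htlt : t < hi - lo := Finset.mem_range.mp ht
  simp only [Function.comp_apply]
  have e1 : (lo : Int) + (t : Int) = ((lo + t : Nat) : Int) := by push_cast; ring
  rw [e1, PySem.List.pyGetD_natCast]
  have e2 : (d : Int) - ((lo + t : Nat) : Int) = ((d - (lo + t) : Nat) : Int) := by
    have : lo + t ≤ d := by omega
    omega
  rw [e2, PySem.List.pyGetD_natCast]

-- B's fold equals the diagonal-by-diagonal Finset double sum (nonempty board)
lemma solution_alt_eq_finset (board : List (List Int)) (k : Int) (hne : board ≠ []) :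
    solution_alt board k =
      ∑ d ∈ Finset.range
          (min k ((board.length : Int) + ((board.headD []).length : Int) - 2) + 1).toNat,
        ∑ i ∈ Finset.Ico (d + 1 - (board.headD []).length) (min board.length (d + 1)),
          (board.getD i []).getD (d - i) 0 := by
  have hlen0 : board.length ≠ 0 := fun h => hne (List.length_eq_zero_iff.mp h)
  have hrows : (board.length : Int) ≠ 0 := by exact_mod_cast hlen0
  have hget0 : PySem.List.pyGetD board 0 [] = board.headD [] := by
    cases board with
    | nil => exact absurd rfl hne
    | cons r rest => simp [PySem.List.pyGetD_zero_cons]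
  rw [solution_alt.eq_def]
  simp only [PySem.List.len_eq, hget0, if_pos hrows]
  set m := (board.headD []).length with hmdef
  set D : Int := min k ((board.length : Int) + (m : Int) - 2) + 1 with hDdef
  rw [PySem.List.foldl_congr_mem (PySem.List.pyRange 0 D 1) _
      (fun total dd => total +
        (PySem.List.pyRange (max 0 (dd - (m : Int) + 1)) (min (board.length : Int) (dd + 1)) 1).foldl
          (fun t i => t + PySem.List.pyGetD (PySem.List.pyGetD board i []) (dd - i) 0) 0) 0
      (fun total dd _ => by
        simp only [PySem.List.foldl_add, zero_add])]
  rw [PySem.List.foldl_add, PySem.List.pyRange_one, List.map_map, listSum_range, zero_add]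
  have hD0 : (D - 0).toNat = D.toNat := by omega
  rw [hD0]
  apply Finset.sum_congr rfl
  intro d _
  simp only [Function.comp_apply, zero_add]
  exact diagTerm_eq board d

-- ===== VERDICT (by name: the statement is the Claim_ definition above) =====
theorem solution_spec : Claim_equal_solution := by
  intro board k _hdom hpre
  unfold Spec_solution
  rcases hpre with hnil | ⟨hm, hpre⟩
  · subst hnil
    have hA : solution [] k = 0 := rfl
    rw [hA, solution_alt.eq_def]
    simp only [PySem.List.len_eq, List.length_nil, Nat.cast_zero]
    rw [PySem.List.pyRange_one_eq_nil (by omega)]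
    rfl
  · have hne : board ≠ [] := by
      intro h; subst h; simp at hm
    rw [solution_eq_colSum board k hm, colSum_eq_finset,
      solution_alt_eq_finset board k hne,
      diag_reindex board.length (board.headD []).length k
        (fun i j => (board.getD i []).getD j 0)]
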